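-- pv_equiv track=rewrite | github.com/RichieSjt/DFA-minimizer | dfa-minimizer/main.py | search_repeated_transitions
-- ===== SOURCE A (Python) =====
-- import itertools
--
-- def search_repeated_transitions(dfa, initial_states, final_states):
--     repeated = list()
--
--     #Comparing every state with each other only once
--     for i, j in itertools.combinations(dfa, 2):
--         if dfa[i] == dfa[j]:
--             if (i not in final_states and j not in final_states) or (i in final_states and j in final_states):
--                 #Making sure to not add duplicate states
--                 if i not in repeated: repeated.append(i)
--                 if j not in repeated: repeated.append(j)
--     return repeated
-- ===== SOURCE B (Python) =====
-- def search_repeated_transitions(dfa, initial_states, final_states):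
--     # Bucket every state by a canonical signature: (sorted transition items, finality).
--     # Two states have equal transition dicts and equal finality exactly when their
--     # signatures coincide, so each non-singleton bucket is one group of repeats.
--     buckets = {}
--     for state, transitions in dfa.items():
--         signature = (tuple(sorted(transitions.items())), state in final_states)
--         buckets.setdefault(signature, []).append(state)
--     repeated = []
--     for group in buckets.values():
--         if len(group) > 1:
--             repeated.extend(group)
--     return repeated
-- ===== Notes on version B (the rewrite author's own statement) =====
-- stated objective: faster
-- what changed: Replaces the O(n^2) all-pairs comparison (with a linear duplicate scan on every append) by a single pass that buckets states in an insertion-ordered dict keyed by (sorted transition items, finality) and concatenates the non-singleton buckets.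
import Mathlib
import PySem

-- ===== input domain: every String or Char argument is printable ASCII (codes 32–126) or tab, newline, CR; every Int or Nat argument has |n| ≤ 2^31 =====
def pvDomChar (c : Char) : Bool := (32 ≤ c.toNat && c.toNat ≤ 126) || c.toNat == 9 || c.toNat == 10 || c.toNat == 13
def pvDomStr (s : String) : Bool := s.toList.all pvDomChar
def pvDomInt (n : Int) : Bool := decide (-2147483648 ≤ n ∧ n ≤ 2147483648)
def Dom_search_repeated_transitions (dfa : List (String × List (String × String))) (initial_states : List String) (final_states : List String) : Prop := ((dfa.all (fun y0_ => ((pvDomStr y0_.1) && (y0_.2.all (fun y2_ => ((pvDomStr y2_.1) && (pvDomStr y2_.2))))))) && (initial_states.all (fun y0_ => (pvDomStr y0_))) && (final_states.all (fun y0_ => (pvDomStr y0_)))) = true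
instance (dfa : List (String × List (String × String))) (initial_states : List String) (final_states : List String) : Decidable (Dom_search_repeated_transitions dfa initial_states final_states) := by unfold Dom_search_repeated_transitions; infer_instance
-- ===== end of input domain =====

-- B replaces A's O(n^2) all-pairs scan by one pass bucketing states by (sorted transitions, finality).

-- ===== PORT A =====
-- Python '==' on two str->str dicts: same key set and the same value at every key (order-insensitive).
def pyDictEqSS (u v : PySem.Dict String String) : Bool :=
  PySem.Set.equal u.keys v.keys && u.keys.all (fun k => u.get? k == v.get? k)

def search_repeated_transitions (dfa : List (String × List (String × String))) (initial_states : List String) (final_states : List String) : List String :=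
  let d := PySem.Dict.ofList dfa
  (PySem.List.combinations d.keys 2).foldl
    (fun repeated c =>
      match c with
      | [i, j] =>
        if pyDictEqSS (PySem.Dict.ofList (d.getD i [])) (PySem.Dict.ofList (d.getD j [])) then
          if (!(final_states.contains i) && !(final_states.contains j))
              || (final_states.contains i && final_states.contains j) then
            let repeated := if repeated.contains i then repeated else repeated ++ [i]
            if repeated.contains j then repeated else repeated ++ [j]
          else repeated
        else repeated
      | _ => repeated)
    []

-- ===== PORT B =====
-- signature = (tuple(sorted(transitions.items())), state in final_states)
def pySig (transitions : List (String × String)) (final_states : List String) (state : String) :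
    (List (String × String)) × Bool :=
  (PySem.List.sorted2 (PySem.Dict.ofList transitions).items Prod.fst Prod.snd, final_states.contains state)

def search_repeated_transitions_alt (dfa : List (String × List (String × String))) (initial_states : List String) (final_states : List String) : List String :=
  let d := PySem.Dict.ofList dfa
  let buckets := d.items.foldl
    (fun (b : PySem.Dict ((List (String × String)) × Bool) (List String)) p =>
      b.modify (pySig p.2 final_states p.1) [] (fun g => g ++ [p.1]))
    PySem.Dict.empty
  buckets.values.foldl (fun repeated g => if 1 < g.length then repeated ++ g else repeated) []

-- ===== PRECONDITION & SPEC =====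
def Spec_search_repeated_transitions (dfa : List (String × List (String × String))) (initial_states : List String) (final_states : List String) (out : List String) : Prop := out = search_repeated_transitions_alt dfa initial_states final_states
instance (dfa : List (String × List (String × String))) (initial_states : List String) (final_states : List String) (out : List String) : Decidable (Spec_search_repeated_transitions dfa initial_states final_states out) := by unfold Spec_search_repeated_transitions; infer_instance

-- ===== CLAIM (what is proved, stated in full; the proofs are below) =====
def Claim_equal_search_repeated_transitions : Prop := ∀ (dfa : List (String × List (String × String))) (initial_states : List String) (final_states : List String), Dom_search_repeated_transitions dfa initial_states final_states → Spec_search_repeated_transitions dfa initial_states final_states (search_repeated_transitions dfa initial_states final_states)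

-- ===== LEMMAS AND PROOFS =====

-- Python's sorted on pairs of strings is sorting by the lexicographic (Lex) order.
lemma pv_sorted2_eq_sorted_toLex (xs : List (String × String)) :
    PySem.List.sorted2 xs Prod.fst Prod.snd = PySem.List.sorted xs (fun p => toLex p) false := by
  have hcmp : (fun (a b : String × String) => (decide (a.1 < b.1) || (!decide (b.1 < a.1) && decide (a.2 < b.2))))
      = (fun (a b : String × String) => decide ((toLex a : Lex (String × String)) < toLex b)) := by
    funext a b
    have h : ((toLex a : Lex (String × String)) < toLex b) ↔ (a.1 < b.1 ∨ a.1 = b.1 ∧ a.2 < b.2) :=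
      Prod.Lex.lt_iff
    rcases lt_trichotomy a.1 b.1 with h1 | h1 | h1
    · simp [h, h1, lt_asymm h1]
    · simp [h, h1]
    · simp [h, h1, lt_asymm h1, ne_of_gt h1]
  simp only [PySem.List.sorted2, PySem.List.sorted]
  rw [hcmp]
  simp

lemma pv_sorted2_congr_perm {xs ys : List (String × String)} (h : xs.Perm ys) :
    PySem.List.sorted2 xs Prod.fst Prod.snd = PySem.List.sorted2 ys Prod.fst Prod.snd := by
  rw [pv_sorted2_eq_sorted_toLex, pv_sorted2_eq_sorted_toLex]
  exact PySem.List.sorted_eq_sorted_of_perm xs ys _ toLex.injective h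

-- Canonicalisation: Python dict equality is equality of the sorted item lists.
lemma pv_dictEq_iff_sorted (u v : PySem.Dict String String)
    (hu : u.keys.Nodup) (hv : v.keys.Nodup) :
    pyDictEqSS u v = true ↔
      PySem.List.sorted2 u.items Prod.fst Prod.snd = PySem.List.sorted2 v.items Prod.fst Prod.snd := by
  have hui : u.items.Nodup := List.Nodup.of_map Prod.fst hu
  have hvi : v.items.Nodup := List.Nodup.of_map Prod.fst hv
  constructor
  · intro h
    unfold pyDictEqSS at h
    rw [Bool.and_eq_true] at h
    obtain ⟨hk, ha⟩ := h
    rw [PySem.Set.equal_iff] at hk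
    rw [List.all_eq_true] at ha
    have hmem : ∀ p, p ∈ u.items ↔ p ∈ v.items := by
      rintro ⟨k, w⟩
      constructor
      · intro hp
        have hku : k ∈ u.keys := List.mem_map.2 ⟨(k, w), hp, rfl⟩
        have hb := ha k hku
        rw [beq_iff_eq] at hb
        have hg : v.get? k = some w := by
          rw [← hb]; exact PySem.Dict.get?_of_mem_items u hp hu
        exact (PySem.Dict.get?_eq_some_iff_mem_items v k w hv).1 hg
      · intro hp
        have hkv : k ∈ v.keys := List.mem_map.2 ⟨(k, w), hp, rfl⟩
        have hku : k ∈ u.keys := (hk k).2 hkv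
        have hb := ha k hku
        rw [beq_iff_eq] at hb
        have hg : u.get? k = some w := by
          rw [hb]; exact PySem.Dict.get?_of_mem_items v hp hv
        exact (PySem.Dict.get?_eq_some_iff_mem_items u k w hu).1 hg
    exact pv_sorted2_congr_perm ((List.perm_ext_iff_of_nodup hui hvi).2 hmem)
  · intro h
    have hperm : u.items.Perm v.items :=
      ((PySem.List.sorted2_perm u.items Prod.fst Prod.snd false).symm.trans
        (h ▸ PySem.List.sorted2_perm v.items Prod.fst Prod.snd false))
    have hkmem : ∀ x, x ∈ u.keys ↔ x ∈ v.keys := fun x => (hperm.map Prod.fst).mem_iff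
    unfold pyDictEqSS
    rw [Bool.and_eq_true]
    constructor
    · rw [PySem.Set.equal_iff]; exact hkmem
    · rw [List.all_eq_true]
      intro k hku
      obtain ⟨⟨k', w⟩, hp, hk'⟩ := List.mem_map.1 hku
      cases hk'
      have h1 : u.get? k' = some w := PySem.Dict.get?_of_mem_items u hp hu
      have h2 : v.get? k' = some w := PySem.Dict.get?_of_mem_items v (hperm.mem_iff.1 hp) hv
      rw [h1, h2]
      exact beq_self_eq_true _

-- Abstract forms of the two loops, over the list of (signature, state) entries.
def pvStep {κ : Type} [BEq κ] (p : κ × String) (rest : List (κ × String)) (acc : List String) : List String :=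
  rest.foldl (fun a q => if p.1 == q.1 then PySem.Set.add (PySem.Set.add a p.2) q.2 else a) acc

def pvAfold {κ : Type} [BEq κ] (l : List (κ × String)) (acc : List String) : List String :=
  (PySem.List.combinations l 2).foldl
    (fun a c => match c with
      | [p, q] => if p.1 == q.1 then PySem.Set.add (PySem.Set.add a p.2) q.2 else a
      | _ => a) acc

def pvSpecS {κ : Type} [BEq κ] (l : List (κ × String)) (S : List κ) : List String :=
  match l with
  | [] => []
  | p :: rest =>
    if S.contains p.1 then pvSpecS rest S
    else if (rest.filter (fun q => q.1 == p.1)).isEmpty then pvSpecS rest S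
    else (p.2 :: (rest.filter (fun q => q.1 == p.1)).map (fun q => q.2)) ++ pvSpecS rest (p.1 :: S)

def pvEntries (dfa : List (String × List (String × String))) (fin : List String) :
    List (((List (String × String)) × Bool) × String) :=
  (PySem.Dict.ofList dfa).items.map (fun p => (pySig p.2 fin p.1, p.1))

def pvGroups {κ : Type} [BEq κ] (l : List (κ × String)) : List (List String) :=
  (PySem.Set.ofList (l.map (fun q => q.1))).map
    (fun s => (l.filter (fun q => q.1 == s)).map (fun q => q.2))

lemma pvAfold_cons {κ : Type} [BEq κ] (p : κ × String) (rest : List (κ × String)) (acc : List String) :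
    pvAfold (p :: rest) acc = pvAfold rest (pvStep p rest acc) := by
  unfold pvAfold pvStep
  rw [PySem.List.combinations_cons_succ, PySem.List.combinations_one, List.foldl_append,
    List.map_map, List.foldl_map]
  have h2 : PySem.List.combinations rest (1 + 1) = PySem.List.combinations rest 2 := rfl
  rw [h2]
  congr 1

lemma pv_fold2_all_mem {κ : Type} [BEq κ] [LawfulBEq κ] (p2 : String) :
    ∀ (g : List (κ × String)) (acc : List String), p2 ∈ acc → (∀ q ∈ g, q.2 ∈ acc) →
    g.foldl (fun a q => PySem.Set.add (PySem.Set.add a p2) q.2) acc = acc := by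
  intro g
  induction g with
  | nil => intro acc _ _; rfl
  | cons q g' ih =>
    intro acc hp hall
    rw [List.foldl_cons, PySem.Set.add_of_mem hp, PySem.Set.add_of_mem (hall q List.mem_cons_self)]
    exact ih acc hp (fun q' hq' => hall q' (List.mem_cons_of_mem q hq'))

lemma pv_fold2_fresh {κ : Type} [BEq κ] [LawfulBEq κ] (p2 : String) :
    ∀ (g : List (κ × String)) (acc : List String), p2 ∈ acc →
    (g.map (fun q => q.2)).Nodup → (∀ q ∈ g, q.2 ∉ acc) →
    g.foldl (fun a q => PySem.Set.add (PySem.Set.add a p2) q.2) acc = acc ++ g.map (fun q => q.2) := by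
  intro g
  induction g with
  | nil => intro acc _ _ _; simp
  | cons q g' ih =>
    intro acc hp hnd hfr
    rw [List.map_cons, List.nodup_cons] at hnd
    rw [List.foldl_cons, PySem.Set.add_of_mem hp,
      PySem.Set.add_of_not_mem (hfr q List.mem_cons_self)]
    rw [ih (acc ++ [q.2]) (List.mem_append_left _ hp) hnd.2 ?fr]
    · simp
    case fr =>
      intro q' hq'
      simp only [List.mem_append, List.mem_singleton]
      rintro (h | h)
      · exact hfr q' (List.mem_cons_of_mem q hq') h
      · exact hnd.1 (h ▸ List.mem_map.2 ⟨q', hq', rfl⟩)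

lemma pv_fold2_start {κ : Type} [BEq κ] [LawfulBEq κ] (p2 : String)
    (g : List (κ × String)) (acc : List String) (hp : p2 ∉ acc)
    (hpg : p2 ∉ g.map (fun q => q.2)) (hnd : (g.map (fun q => q.2)).Nodup)
    (hfr : ∀ q ∈ g, q.2 ∉ acc) (hne : g ≠ []) :
    g.foldl (fun a q => PySem.Set.add (PySem.Set.add a p2) q.2) acc
      = acc ++ p2 :: g.map (fun q => q.2) := by
  cases g with
  | nil => exact absurd rfl hne
  | cons q g' =>
    rw [List.map_cons, List.nodup_cons] at hnd
    have hpg1 : p2 ≠ q.2 := fun h => hpg (by rw [List.map_cons]; exact List.mem_cons.2 (Or.inl h))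
    have hpg2 : p2 ∉ g'.map (fun q => q.2) :=
      fun h => hpg (by rw [List.map_cons]; exact List.mem_cons.2 (Or.inr h))
    rw [List.foldl_cons, PySem.Set.add_of_not_mem hp, PySem.Set.add_of_not_mem ?q2]
    case q2 =>
      simp only [List.mem_append, List.mem_singleton]
      rintro (h | h)
      · exact hfr q List.mem_cons_self h
      · exact hpg1 h.symm
    rw [pv_fold2_fresh p2 g' (acc ++ [p2] ++ [q.2]) (by simp) hnd.2 ?fr]
    · simp
    case fr =>
      intro q' hq'
      simp only [List.mem_append, List.mem_singleton]
      rintro ((h | h) | h)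
      · exact hfr q' (List.mem_cons_of_mem q hq') h
      · exact hpg2 (h ▸ List.mem_map.2 ⟨q', hq', rfl⟩)
      · exact hnd.1 (h ▸ List.mem_map.2 ⟨q', hq', rfl⟩)

lemma pvAfold_spec {κ : Type} [BEq κ] [LawfulBEq κ] :
    ∀ (l : List (κ × String)) (acc : List String) (S : List κ),
      (l.map (fun q => q.2)).Nodup → (∀ q ∈ l, (q.2 ∈ acc ↔ q.1 ∈ S)) →
      pvAfold l acc = acc ++ pvSpecS l S := by
  intro l
  induction l with
  | nil => intro acc S _ _; simp [pvAfold, pvSpecS, PySem.List.combinations_nil_succ]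
  | cons p rest ih =>
    intro acc S hnd0 hinv
    rw [List.map_cons, List.nodup_cons] at hnd0
    obtain ⟨hnd1, hnd⟩ := hnd0
    have hstep : pvStep p rest acc
        = (rest.filter (fun q => q.1 == p.1)).foldl
            (fun a q => PySem.Set.add (PySem.Set.add a p.2) q.2) acc := by
      unfold pvStep
      rw [PySem.List.foldl_if_eq_foldl_filter (fun q => p.1 == q.1) _ rest acc]
      congr 1
      refine List.filter_congr (fun x _ => ?_)
      rcases eq_or_ne p.1 x.1 with h | h
      · rw [h]
      · rw [beq_eq_false_iff_ne.2 h, beq_eq_false_iff_ne.2 h.symm]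
    have hgsub : ((rest.filter (fun q => q.1 == p.1)).map (fun q => q.2)).Sublist
        (rest.map (fun q => q.2)) := List.Sublist.map _ List.filter_sublist
    have hgnd : ((rest.filter (fun q => q.1 == p.1)).map (fun q => q.2)).Nodup :=
      hnd.sublist hgsub
    rw [pvAfold_cons, hstep]
    by_cases hS : p.1 ∈ S
    · -- this signature group was already emitted: every add is a no-op
      rw [pv_fold2_all_mem p.2 _ acc ((hinv p List.mem_cons_self).2 hS) ?all]
      case all =>
        intro q hq
        have hq1 : q.1 = p.1 := eq_of_beq (List.mem_filter.1 hq).2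
        exact (hinv q (List.mem_cons_of_mem p (List.mem_of_mem_filter hq))).2 (hq1 ▸ hS)
      rw [ih acc S hnd (fun q hq => hinv q (List.mem_cons_of_mem p hq))]
      conv_rhs => unfold pvSpecS
      rw [if_pos (List.contains_iff_mem.2 hS)]
    · have hScon : S.contains p.1 = false := by
        rw [Bool.eq_false_iff]
        intro h; exact hS (List.contains_iff_mem.1 h)
      have hfr : ∀ q ∈ rest.filter (fun q => q.1 == p.1), q.2 ∉ acc := by
        intro q hq h
        have hq1 : q.1 = p.1 := eq_of_beq (List.mem_filter.1 hq).2
        exact hS (hq1 ▸ (hinv q (List.mem_cons_of_mem p (List.mem_of_mem_filter hq))).1 h)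
      by_cases hg : rest.filter (fun q => q.1 == p.1) = []
      · rw [hg, List.foldl_nil]
        rw [ih acc S hnd (fun q hq => hinv q (List.mem_cons_of_mem p hq))]
        conv_rhs => unfold pvSpecS
        rw [if_neg (by simp [hS]), if_pos (by simp [hg])]
      · have hpg : p.2 ∉ (rest.filter (fun q => q.1 == p.1)).map (fun q => q.2) :=
          fun h => hnd1 (hgsub.mem h)
        have hpacc : p.2 ∉ acc := fun h => hS ((hinv p List.mem_cons_self).1 h)
        rw [pv_fold2_start p.2 _ acc hpacc hpg hgnd hfr hg]
        rw [ih (acc ++ p.2 :: (rest.filter (fun q => q.1 == p.1)).map (fun q => q.2)) (p.1 :: S) hnd ?inv]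
        · conv_rhs => unfold pvSpecS
          rw [if_neg (by simp [hS]), if_neg (by simp [hg])]
          rw [List.append_assoc]
        case inv =>
          intro q hq
          have hq2r : q.2 ∈ rest.map (fun q => q.2) := List.mem_map.2 ⟨q, hq, rfl⟩
          constructor
          · intro h
            rcases List.mem_append.1 h with h | h
            · exact List.mem_cons_of_mem _ ((hinv q (List.mem_cons_of_mem p hq)).1 h)
            · rcases List.mem_cons.1 h with h | h
              · exact absurd (h ▸ hq2r) hnd1
              · obtain ⟨q', hq', he⟩ := List.mem_map.1 h
                have hqq : q' = q :=
                  List.inj_on_of_nodup_map hnd (List.mem_of_mem_filter hq') hq he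
                have hq'' : q ∈ rest.filter (fun q => q.1 == p.1) := hqq ▸ hq'
                exact List.mem_cons.2 (Or.inl (eq_of_beq (List.mem_filter.1 hq'').2))
          · intro h
            rcases List.mem_cons.1 h with h | h
            · refine List.mem_append_right _ (List.mem_cons_of_mem _ ?_)
              exact List.mem_map.2 ⟨q, List.mem_filter.2 ⟨hq, by simp [h]⟩, rfl⟩
            · exact List.mem_append_left _ ((hinv q (List.mem_cons_of_mem p hq)).2 h)

lemma pvB_spec {κ : Type} [BEq κ] [LawfulBEq κ] :
    ∀ (l : List (κ × String)) (S : List κ),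
      ((((PySem.Set.ofList (l.map (fun q => q.1))).filter (fun s => !S.contains s)).map
          (fun s => (l.filter (fun q => q.1 == s)).map (fun q => q.2))).filter
          (fun g => decide (1 < g.length))).flatten = pvSpecS l S := by
  intro l
  induction l with
  | nil => intro S; simp [pvSpecS, PySem.Set.ofList_nil]
  | cons p rest ih =>
    intro S
    rw [List.map_cons, PySem.Set.ofList_cons]
    by_cases hS : p.1 ∈ S
    · have hScon : S.contains p.1 = true := List.contains_iff_mem.2 hS
      rw [List.filter_cons_of_neg (by simp [hS])]
      have hdrop : ((PySem.Set.ofList (rest.map (fun q => q.1))).discard p.1).filter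
            (fun s => !S.contains s)
          = (PySem.Set.ofList (rest.map (fun q => q.1))).filter (fun s => !S.contains s) := by
        show ((PySem.Set.ofList (rest.map (fun q => q.1))).filter (fun y => !(y == p.1))).filter
            (fun s => !S.contains s) = _
        rw [List.filter_filter]
        refine List.filter_congr (fun s _ => ?_)
        by_cases hsp : s = p.1
        · subst hsp; simp [hS]
        · simp [hsp]
      rw [hdrop]
      have hmapc : (((PySem.Set.ofList (rest.map (fun q => q.1))).filter
            (fun s => !S.contains s)).map
            (fun s => ((p :: rest).filter (fun q => q.1 == s)).map (fun q => q.2)))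
          = (((PySem.Set.ofList (rest.map (fun q => q.1))).filter
            (fun s => !S.contains s)).map
            (fun s => (rest.filter (fun q => q.1 == s)).map (fun q => q.2))) := by
        refine List.map_congr_left (fun s hs => ?_)
        have hsne : s ≠ p.1 := by
          intro h
          have hsf := (List.mem_filter.1 hs).2
          rw [h, hScon] at hsf
          simp at hsf
        rw [List.filter_cons_of_neg (by simp [Ne.symm hsne])]
      rw [hmapc, ih S]
      conv_rhs => unfold pvSpecS
      rw [if_pos hScon]
    · have hScon : S.contains p.1 = false := by
        rw [Bool.eq_false_iff]; intro h; exact hS (List.contains_iff_mem.1 h)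
      rw [List.filter_cons_of_pos (by simp [hS]), List.map_cons]
      have hgrp : ((p :: rest).filter (fun q => q.1 == p.1)).map (fun q => q.2)
          = p.2 :: (rest.filter (fun q => q.1 == p.1)).map (fun q => q.2) := by
        rw [List.filter_cons_of_pos (by simp), List.map_cons]
      by_cases hg : rest.filter (fun q => q.1 == p.1) = []
      · -- singleton bucket: dropped by the `len(group) > 1` test
        rw [hgrp, hg]
        rw [List.filter_cons_of_neg (by simp)]
        have hnomem : p.1 ∉ PySem.Set.ofList (rest.map (fun q => q.1)) := by
          rw [PySem.Set.mem_ofList]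
          intro h
          obtain ⟨q, hq, he⟩ := List.mem_map.1 h
          have hqf : q ∈ rest.filter (fun q => q.1 == p.1) :=
            List.mem_filter.2 ⟨hq, by simp [he]⟩
          rw [hg] at hqf
          exact absurd hqf List.not_mem_nil
        have hdisc : (PySem.Set.ofList (rest.map (fun q => q.1))).discard p.1
            = PySem.Set.ofList (rest.map (fun q => q.1)) := by
          show List.filter _ _ = _
          refine List.filter_eq_self.2 (fun s hs => ?_)
          simp only [Bool.not_eq_eq_eq_not, Bool.not_true, beq_eq_false_iff_ne, ne_eq]
          intro h; exact hnomem (h ▸ hs)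
        rw [hdisc]
        have hmapc : (((PySem.Set.ofList (rest.map (fun q => q.1))).filter
              (fun s => !S.contains s)).map
              (fun s => ((p :: rest).filter (fun q => q.1 == s)).map (fun q => q.2)))
            = (((PySem.Set.ofList (rest.map (fun q => q.1))).filter
              (fun s => !S.contains s)).map
              (fun s => (rest.filter (fun q => q.1 == s)).map (fun q => q.2))) := by
          refine List.map_congr_left (fun s hs => ?_)
          have hsne : s ≠ p.1 := by
            intro h
            exact hnomem (h ▸ List.mem_of_mem_filter hs)
          rw [List.filter_cons_of_neg (by simp [Ne.symm hsne])]
        rw [hmapc, ih S]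
        conv_rhs => unfold pvSpecS
        rw [if_neg (by simp [hS]), if_pos (by simp [hg])]
      · -- real group: emitted here, its signature joins S
        rw [hgrp]
        rw [List.filter_cons_of_pos (by
          simp only [List.length_cons, List.length_map, decide_eq_true_eq]
          have hpos : 0 < (rest.filter (fun q => q.1 == p.1)).length := List.length_pos_iff.2 hg
          omega)]
        rw [List.flatten_cons]
        have hdrop : ((PySem.Set.ofList (rest.map (fun q => q.1))).discard p.1).filter
              (fun s => !S.contains s)
            = (PySem.Set.ofList (rest.map (fun q => q.1))).filter
              (fun s => !(p.1 :: S).contains s) := by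
          show ((PySem.Set.ofList (rest.map (fun q => q.1))).filter (fun y => !(y == p.1))).filter
              (fun s => !S.contains s) = _
          rw [List.filter_filter]
          refine List.filter_congr (fun s _ => ?_)
          rw [List.contains_cons]
          simp [Bool.and_comm]
        rw [hdrop]
        have hmapc : (((PySem.Set.ofList (rest.map (fun q => q.1))).filter
              (fun s => !(p.1 :: S).contains s)).map
              (fun s => ((p :: rest).filter (fun q => q.1 == s)).map (fun q => q.2)))
            = (((PySem.Set.ofList (rest.map (fun q => q.1))).filter
              (fun s => !(p.1 :: S).contains s)).map
              (fun s => (rest.filter (fun q => q.1 == s)).map (fun q => q.2))) := by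
          refine List.map_congr_left (fun s hs => ?_)
          have hsne : s ≠ p.1 := by
            intro h
            have hsf := (List.mem_filter.1 hs).2
            rw [h, List.contains_cons] at hsf
            simp at hsf
          rw [List.filter_cons_of_neg (by simp [Ne.symm hsne])]
        rw [hmapc, ih (p.1 :: S)]
        conv_rhs => unfold pvSpecS
        rw [if_neg (by simp [hS]), if_neg (by simp [hg])]

lemma pv_if_and (X Y : Bool) (t e : List String) :
    (if X = true then (if Y = true then t else e) else e) = (if (X && Y) = true then t else e) := by
  cases X <;> simp

lemma pv_fin_eq (a b : Bool) : ((!a && !b) || (a && b)) = (a == b) := by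
  cases a <;> cases b <;> rfl

lemma pv_cond_eq (v1 v2 : List (String × String)) (fin : List String) (s1 s2 : String) :
    (pyDictEqSS (PySem.Dict.ofList v1) (PySem.Dict.ofList v2)
      && ((!fin.contains s1 && !fin.contains s2) || (fin.contains s1 && fin.contains s2)))
    = (pySig v1 fin s1 == pySig v2 fin s2) := by
  unfold pySig
  have h1 : pyDictEqSS (PySem.Dict.ofList v1) (PySem.Dict.ofList v2)
      = (PySem.List.sorted2 (PySem.Dict.ofList v1).items Prod.fst Prod.snd
          == PySem.List.sorted2 (PySem.Dict.ofList v2).items Prod.fst Prod.snd) := by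
    rw [Bool.eq_iff_iff]
    rw [pv_dictEq_iff_sorted _ _ (PySem.Dict.nodup_keys_ofList v1) (PySem.Dict.nodup_keys_ofList v2)]
    rw [beq_iff_eq]
  rw [h1, pv_fin_eq]
  rfl

lemma pv_portA (dfa : List (String × List (String × String))) (ini fin : List String) :
    search_repeated_transitions dfa ini fin = pvAfold (pvEntries dfa fin) [] := by
  unfold search_repeated_transitions pvAfold pvEntries
  dsimp only []
  have hkeys : (PySem.Dict.ofList dfa).keys = (PySem.Dict.ofList dfa).items.map Prod.fst := rfl
  rw [hkeys, PySem.List.combinations_map, List.foldl_map,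
    PySem.List.combinations_map, List.foldl_map]
  apply PySem.List.foldl_congr_mem
  intro acc c hc
  rcases c with _ | ⟨p, _ | ⟨q, _ | ⟨r, t⟩⟩⟩
  · rfl
  · rfl
  · have hp : p ∈ (PySem.Dict.ofList dfa).items :=
      (PySem.List.sublist_of_mem_combinations hc).subset (by simp)
    have hq : q ∈ (PySem.Dict.ofList dfa).items :=
      (PySem.List.sublist_of_mem_combinations hc).subset (by simp)
    show (if pyDictEqSS (PySem.Dict.ofList ((PySem.Dict.ofList dfa).getD p.1 []))
            (PySem.Dict.ofList ((PySem.Dict.ofList dfa).getD q.1 [])) = true then _ else _) = _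
    rw [PySem.Dict.getD_of_mem_items (PySem.Dict.ofList dfa) (by exact hp)
        (PySem.Dict.nodup_keys_ofList dfa) [],
      PySem.Dict.getD_of_mem_items (PySem.Dict.ofList dfa) (by exact hq)
        (PySem.Dict.nodup_keys_ofList dfa) []]
    rw [pv_if_and, pv_cond_eq]
    rfl
  · rfl

lemma pv_portB (dfa : List (String × List (String × String))) (ini fin : List String) :
    search_repeated_transitions_alt dfa ini fin
      = ((pvGroups (pvEntries dfa fin)).filter (fun g => decide (1 < g.length))).flatten := by
  unfold search_repeated_transitions_alt pvGroups
  dsimp only []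
  have hfold : (PySem.Dict.ofList dfa).items.foldl
        (fun (b : PySem.Dict ((List (String × String)) × Bool) (List String)) p =>
          b.modify (pySig p.2 fin p.1) [] (fun g => g ++ [p.1])) PySem.Dict.empty
      = (pvEntries dfa fin).foldl (fun b e => b.modify e.1 [] (fun g => g ++ [e.2]))
          PySem.Dict.empty := by
    unfold pvEntries
    rw [List.foldl_map]
  have hkeys : ((pvEntries dfa fin).foldl (fun b e => b.modify e.1 [] (fun g => g ++ [e.2]))
        (PySem.Dict.empty : PySem.Dict ((List (String × String)) × Bool) (List String))).keys
      = PySem.Set.ofList ((pvEntries dfa fin).map (fun q => q.1)) := by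
    rw [PySem.Dict.keys_foldl_modify_key (pvEntries dfa fin) Prod.fst []
      (fun _ e v => v ++ [e.2]) PySem.Dict.empty]
    rw [PySem.Dict.keys_empty, PySem.Set.update_nil_left]
  have hnodup : ((pvEntries dfa fin).foldl (fun b e => b.modify e.1 [] (fun g => g ++ [e.2]))
        (PySem.Dict.empty : PySem.Dict ((List (String × String)) × Bool) (List String))).keys.Nodup := by
    apply PySem.Dict.nodup_keys_foldl_modify_key (pvEntries dfa fin) Prod.fst []
      (fun _ e v => v ++ [e.2]) PySem.Dict.empty
    rw [PySem.Dict.keys_empty]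
    exact List.nodup_nil
  have hval : ∀ s, ((pvEntries dfa fin).foldl (fun b e => b.modify e.1 [] (fun g => g ++ [e.2]))
        (PySem.Dict.empty : PySem.Dict ((List (String × String)) × Bool) (List String))).getD s []
      = ((pvEntries dfa fin).filter (fun q => q.1 == s)).map (fun q => q.2) := by
    intro s
    rw [PySem.Dict.getD_foldl_modify_append (pvEntries dfa fin) PySem.Dict.empty s]
    rw [PySem.Dict.getD_empty, List.nil_append]
  rw [hfold]
  rw [PySem.Dict.values_eq_map_keys _ hnodup []]
  rw [hkeys]
  rw [List.map_congr_left (fun s _ => hval s)]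
  rw [PySem.List.foldl_ite_eq_foldl_filter (fun (g : List String) => 1 < g.length)
    (fun (acc x : List String) => acc ++ x)]
  rw [PySem.List.foldl_append_eq_flatten, List.nil_append]

-- ===== VERDICT (by name: the statement is the Claim_ definition above) =====
theorem search_repeated_transitions_spec : Claim_equal_search_repeated_transitions := by
  intro dfa ini fin _
  unfold Spec_search_repeated_transitions
  rw [pv_portA dfa ini fin, pv_portB dfa ini fin]
  have hnd : ((pvEntries dfa fin).map (fun q => q.2)).Nodup := by
    unfold pvEntries
    rw [List.map_map]
    exact PySem.Dict.nodup_keys_ofList dfa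
  rw [pvAfold_spec (pvEntries dfa fin) [] [] hnd (by simp), List.nil_append]
  rw [← pvB_spec (pvEntries dfa fin) []]
  unfold pvGroups
  have hfilt : (PySem.Set.ofList ((pvEntries dfa fin).map (fun q => q.1))).filter
        (fun s => !(([] : List ((List (String × String)) × Bool)).contains s))
      = PySem.Set.ofList ((pvEntries dfa fin).map (fun q => q.1)) := by
    simp
  rw [hfilt]
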